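-- pv_equiv track=rewrite | github.com/Ricky-QiruiLu/ML_models | decision_tree/decisionTree.py | get_split_result
-- ===== SOURCE A (Python) =====
-- def get_split_result(dataset, attr):
--     """
--     get the result after split with attribute attr
--
--     :param dataset: a list of row data
--
--     :param attr: the index of the attribute to split
--
--     :return: a dictionary with split result, i.e. {n: {'democrat': 13, 'republican': 58}, y...}
--
--     """
--     result = {}
--     for sample in dataset:
--         if sample[attr] not in result:
--             result[sample[attr]] = {}
--
--         if sample[-1] not in result[sample[attr]]:
--             result[sample[attr]][sample[-1]] = 0
--         result[sample[attr]][sample[-1]] += 1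
--     return result
-- ===== SOURCE B (Python) =====
-- def count_labels(labels):
--     counts = {}
--     for label in labels:
--         counts[label] = counts.get(label, 0) + 1
--     return counts
--
--
-- def get_split_result(dataset, attr):
--     # Phase 1: group the class labels by attribute value.
--     groups = {}
--     for sample in dataset:
--         groups.setdefault(sample[attr], []).append(sample[-1])
--     # Phase 2: count the labels inside each group.
--     return {value: count_labels(labels) for value, labels in groups.items()}
-- ===== Notes on version B (the rewrite author's own statement) =====
-- stated objective: alternative
-- what changed: A builds the nested {value: {label: count}} dict in a single fused pass; B first groups labels by attribute value into {value: [labels]} with setdefault/append and then counts each group's labels in a separate pass, returning the same plain nested dict of ints.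
import Mathlib
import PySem

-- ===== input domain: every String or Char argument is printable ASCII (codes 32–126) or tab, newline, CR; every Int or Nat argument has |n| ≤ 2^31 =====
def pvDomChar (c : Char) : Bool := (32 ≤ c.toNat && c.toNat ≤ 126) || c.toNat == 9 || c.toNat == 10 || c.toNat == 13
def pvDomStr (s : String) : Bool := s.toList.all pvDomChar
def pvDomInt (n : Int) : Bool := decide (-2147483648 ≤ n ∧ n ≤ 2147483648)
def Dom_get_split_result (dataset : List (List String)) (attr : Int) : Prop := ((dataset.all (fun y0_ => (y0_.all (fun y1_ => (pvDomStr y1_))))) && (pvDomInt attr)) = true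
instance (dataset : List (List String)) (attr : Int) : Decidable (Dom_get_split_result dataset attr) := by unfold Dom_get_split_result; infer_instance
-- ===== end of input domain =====

-- B separates the fused one-pass nested-dict aggregation of A into a grouping pass
-- (attribute value ↦ list of labels) followed by a per-group counting pass (objective: alternative decomposition, same cost).

-- ===== PORT A =====
-- one loop iteration of A: result[sample[attr]][sample[-1]] += 1 with the two membership guards
def pvStepA (attr : Int) (result : PySem.Dict String (PySem.Dict String Int))
    (sample : List String) : PySem.Dict String (PySem.Dict String Int) :=
  match PySem.List.pyGet? sample attr, PySem.List.pyGet? sample (-1) with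
  | some k, some lbl =>
      -- if sample[attr] not in result: result[sample[attr]] = {}
      let result := if result.contains k then result else result.insert k PySem.Dict.empty
      -- if sample[-1] not in result[sample[attr]]: result[sample[attr]][sample[-1]] = 0
      let inner := result.getD k PySem.Dict.empty
      let inner := if inner.contains lbl then inner else inner.insert lbl 0
      -- result[sample[attr]][sample[-1]] += 1
      result.insert k (inner.insert lbl (inner.getD lbl 0 + 1))
  | _, _ => result  -- IndexError in Python; excluded by Pre_

def get_split_result (dataset : List (List String)) (attr : Int) :
    List (String × List (String × Int)) :=
  ((dataset.foldl (pvStepA attr) PySem.Dict.empty).items).map (fun p => (p.1, p.2.items))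

-- ===== PORT B =====
-- count_labels of Source B: counts[label] = counts.get(label, 0) + 1
def pvCountLabels (labels : List String) : PySem.Dict String Int :=
  labels.foldl (fun counts label => counts.insert label (counts.getD label 0 + 1)) PySem.Dict.empty

-- grouping pass: groups.setdefault(sample[attr], []).append(sample[-1]);
-- Dict.modify k [] (· ++ [lbl]) is exactly this in-place setdefault+append (keeps key position, appends new keys)
def pvStepB (attr : Int) (groups : PySem.Dict String (List String))
    (sample : List String) : PySem.Dict String (List String) :=
  match PySem.List.pyGet? sample attr, PySem.List.pyGet? sample (-1) with
  | some k, some lbl => groups.modify k [] (· ++ [lbl])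
  | _, _ => groups  -- IndexError in Python; excluded by Pre_

def get_split_result_alt (dataset : List (List String)) (attr : Int) :
    List (String × List (String × Int)) :=
  ((dataset.foldl (pvStepB attr) PySem.Dict.empty).items).map
    (fun p => (p.1, (pvCountLabels p.2).items))

-- ===== PRECONDITION & SPEC =====
-- Pre_: attr is a valid (possibly negative) Python index into every row; otherwise A raises IndexError
-- (a valid attr index forces the row nonempty, so sample[-1] is in range too).
def Pre_get_split_result (dataset : List (List String)) (attr : Int) : Prop :=
  ∀ s ∈ dataset, PySem.Raise.InRange s.length attr
instance (dataset : List (List String)) (attr : Int) : Decidable (Pre_get_split_result dataset attr) := by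
  unfold Pre_get_split_result; infer_instance

def pvWitness_get_split_result : List (List String) × Int :=
  ([["y", "democrat"], ["n", "republican"], ["y", "democrat"]], 0)

def Spec_get_split_result (dataset : List (List String)) (attr : Int) (out : List (String × List (String × Int))) : Prop := out = get_split_result_alt dataset attr
instance (dataset : List (List String)) (attr : Int) (out : List (String × List (String × Int))) : Decidable (Spec_get_split_result dataset attr out) := by unfold Spec_get_split_result; infer_instance

-- ===== CLAIM (what is proved, stated in full; the proofs are below) =====
def Claim_equal_get_split_result : Prop := ∀ (dataset : List (List String)) (attr : Int), Dom_get_split_result dataset attr → Pre_get_split_result dataset attr → Spec_get_split_result dataset attr (get_split_result dataset attr)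

-- ===== LEMMAS AND PROOFS =====

-- the simulation map: B's grouping dict, counted per value, gives A's nested dict
def pvPhi (g : PySem.Dict String (List String)) : PySem.Dict String (PySem.Dict String Int) :=
  PySem.Dict.mk (g.items.map (fun p => (p.1, pvCountLabels p.2)))

theorem pvPhi_contains (g : PySem.Dict String (List String)) (k : String) :
    (pvPhi g).contains k = g.contains k := by
  obtain ⟨items⟩ := g
  simp only [pvPhi, PySem.Dict.contains_mk, List.any_map]
  rfl

theorem pvPhi_get? (g : PySem.Dict String (List String)) (k : String) :
    (pvPhi g).get? k = (g.get? k).map pvCountLabels := by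
  obtain ⟨items⟩ := g
  induction items with
  | nil => rfl
  | cons p rest ih =>
      obtain ⟨pk, pv⟩ := p
      simp only [pvPhi, List.map_cons, PySem.Dict.get?_mk_cons] at *
      split_ifs with h
      · rfl
      · exact ih

theorem pvPhi_insert (g : PySem.Dict String (List String)) (k : String) (v : List String) :
    pvPhi (g.insert k v) = (pvPhi g).insert k (pvCountLabels v) := by
  apply PySem.Dict.ext
  have hc : (pvPhi g).contains k = g.contains k := pvPhi_contains g k
  by_cases h : g.contains k = true
  · show (g.insert k v).items.map _ = _
    rw [PySem.Dict.items_insert_of_contains _ _ h,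
        PySem.Dict.items_insert_of_contains _ _ (by rw [hc, h])]
    show (g.items.map _).map _ = ((g.items.map _).map _)
    rw [List.map_map, List.map_map]
    refine List.map_congr_left (fun p _ => ?_)
    simp only [Function.comp]
    split_ifs with hp <;> simp
  · have h' : g.contains k = false := by simpa using h
    show (g.insert k v).items.map _ = _
    rw [PySem.Dict.items_insert_of_not_contains _ _ h',
        PySem.Dict.items_insert_of_not_contains _ _ (by rw [hc]; exact h')]
    simp [pvPhi]

theorem pvCountLabels_append (ls : List String) (lbl : String) :
    pvCountLabels (ls ++ [lbl])
      = (pvCountLabels ls).insert lbl ((pvCountLabels ls).getD lbl 0 + 1) := by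
  simp [pvCountLabels, List.foldl_append]

theorem pvStep_comm (attr : Int) (g : PySem.Dict String (List String)) (sample : List String) :
    pvStepA attr (pvPhi g) sample = pvPhi (pvStepB attr g sample) := by
  unfold pvStepA pvStepB
  cases hk : PySem.List.pyGet? sample attr with
  | none => rfl
  | some k =>
  cases hl : PySem.List.pyGet? sample (-1) with
  | none => rfl
  | some lbl =>
  simp only
  have hmod : g.modify k [] (· ++ [lbl]) = g.insert k (g.getD k [] ++ [lbl]) := rfl
  rw [hmod, pvPhi_insert, pvCountLabels_append, pvPhi_contains]
  by_cases h : g.contains k = true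
  · rw [if_pos h]
    have hg : ∃ v, g.get? k = some v := by
      rcases hv : g.get? k with _ | v
      · rw [PySem.Dict.contains_eq_isSome_get?, hv] at h; simp at h
      · exact ⟨v, rfl⟩
    obtain ⟨v, hv⟩ := hg
    have hgd : g.getD k [] = v := PySem.Dict.getD_of_get?_eq_some _ _ hv
    have hpd : (pvPhi g).getD k PySem.Dict.empty = pvCountLabels v := by
      rw [PySem.Dict.getD_eq_get?_getD, pvPhi_get?, hv]; rfl
    rw [hpd, hgd]
    by_cases hl2 : (pvCountLabels v).contains lbl = true
    · rw [if_pos hl2]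
    · rw [if_neg hl2]
      have h0 : (pvCountLabels v).getD lbl 0 = 0 :=
        PySem.Dict.getD_of_not_contains _ _ (by simpa using hl2)
      rw [PySem.Dict.getD_insert_self, PySem.Dict.insert_insert_self, h0]
  · rw [if_neg h]
    have h' : g.contains k = false := by simpa using h
    have hgd : g.getD k [] = [] := PySem.Dict.getD_of_not_contains _ _ h'
    rw [PySem.Dict.getD_insert_self]
    have he : (PySem.Dict.empty : PySem.Dict String Int).contains lbl = false :=
      PySem.Dict.contains_empty lbl
    rw [if_neg (by simp [he]), PySem.Dict.getD_insert_self,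
        PySem.Dict.insert_insert_self, PySem.Dict.insert_insert_self, hgd]
    simp [pvCountLabels, PySem.Dict.getD_empty]

theorem pvFold_comm (attr : Int) (l : List (List String)) (g : PySem.Dict String (List String)) :
    l.foldl (pvStepA attr) (pvPhi g) = pvPhi (l.foldl (pvStepB attr) g) := by
  induction l generalizing g with
  | nil => rfl
  | cons s rest ih => simp only [List.foldl_cons, pvStep_comm]; exact ih _

-- ===== VERDICT (by name: the statement is the Claim_ definition above) =====
theorem get_split_result_spec : Claim_equal_get_split_result := by
  intro dataset attr _ _
  unfold Spec_get_split_result get_split_result get_split_result_alt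
  have h := pvFold_comm attr dataset (PySem.Dict.mk [])
  rw [show (PySem.Dict.empty : PySem.Dict String (PySem.Dict String Int)) = pvPhi (PySem.Dict.mk []) from rfl] at *
  rw [h]
  show ((dataset.foldl (pvStepB attr) _).items.map (fun p => (p.1, pvCountLabels p.2))).map _ = _
  rw [List.map_map]
  rfl
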